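-- pv_equiv track=rewrite | github.com/kytranl2/yeetcode | yeetcode/getTrucksForItems/getTrucksForItems.py | getTrucksForItemsFurtherOptimized
-- ===== SOURCE A (Python) =====
-- def getTrucksForItemsFurtherOptimized(trucks, items):
--     # Create a list of truck indices sorted by their capacities
--     sorted_indices = sorted(range(len(trucks)), key=lambda i: trucks[i])
--
--     result = []
--     for item in items:
--         # Binary search to find the minimum truck capacity that exceeds the item's weight
--         left, right = 0, len(sorted_indices) - 1
--         min_index = -1
--         while left <= right:
--             mid = left + (right - left) // 2
--             if trucks[sorted_indices[mid]] > item: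
--                 min_index = sorted_indices[mid]
--                 right = mid - 1  # Look for a smaller index
--             else:
--                 left = mid + 1
--
--         result.append(min_index)
--     return result
-- ===== SOURCE B (Python) =====
-- def _bestTruck(trucks, item):
--     best_i = -1
--     best_c = 0
--     for i, cap in enumerate(trucks):
--         if cap > item and (best_i == -1 or cap < best_c):
--             best_i, best_c = i, cap
--     return best_i
--
-- def getTrucksForItemsFurtherOptimized(trucks, items):
--     return [_bestTruck(trucks, item) for item in items]
-- ===== Notes on version B (the rewrite author's own statement) =====
-- stated objective: simpler
-- what changed: Replaces the stable pre-sort of truck indices plus per-item hand-written binary search with a direct per-item linear scan that keeps the best (smallest qualifying capacity, earliest index) truck seen so far.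
import Mathlib
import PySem

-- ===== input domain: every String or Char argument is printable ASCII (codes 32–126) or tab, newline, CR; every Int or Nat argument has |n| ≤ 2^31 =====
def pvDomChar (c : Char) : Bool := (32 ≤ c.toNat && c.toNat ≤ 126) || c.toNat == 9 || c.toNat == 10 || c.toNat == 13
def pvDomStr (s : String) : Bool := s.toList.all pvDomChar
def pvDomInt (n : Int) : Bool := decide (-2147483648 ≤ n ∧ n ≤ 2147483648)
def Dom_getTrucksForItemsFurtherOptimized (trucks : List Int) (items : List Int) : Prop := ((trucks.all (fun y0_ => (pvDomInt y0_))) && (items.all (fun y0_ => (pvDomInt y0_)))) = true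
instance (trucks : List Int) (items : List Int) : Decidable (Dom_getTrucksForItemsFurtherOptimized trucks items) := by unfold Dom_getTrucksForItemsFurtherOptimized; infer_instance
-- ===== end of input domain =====

-- B replaces A's stable index pre-sort + per-item binary search with a direct per-item
-- linear scan keeping the best (smallest qualifying capacity, earliest index) truck; simpler, not faster.


-- ===== PORT A =====
-- sorted(range(len(trucks)), key=lambda i: trucks[i])
def pvSortedIndices (trucks : List Int) : List Int :=
  PySem.List.sorted (PySem.List.pyRange 0 (trucks.length : Int) 1)
    (fun i => PySem.List.pyGetD trucks i 0) false

-- the 'while left <= right' binary-search loop, state (left, right, min_index)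
def pvBSearch (trucks : List Int) (s : List Int) (item : Int)
    (left right mi : Int) : Int :=
  if h : left ≤ right then
    let mid := left + PySem.Int.floordiv (right - left) 2
    if PySem.List.pyGetD trucks (PySem.List.pyGetD s mid 0) 0 > item then
      pvBSearch trucks s item left (mid - 1) (PySem.List.pyGetD s mid 0)
    else
      pvBSearch trucks s item (mid + 1) right mi
  else mi
termination_by (right + 1 - left).toNat
decreasing_by
  · rw [PySem.Int.floordiv_eq_ediv_of_pos (by omega : (0:Int) < 2)]; omega
  · rw [PySem.Int.floordiv_eq_ediv_of_pos (by omega : (0:Int) < 2)]; omega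

def getTrucksForItemsFurtherOptimized (trucks : List Int) (items : List Int) : List Int :=
  let s := pvSortedIndices trucks
  items.foldl (fun result item =>
    result ++ [pvBSearch trucks s item 0 ((s.length : Int) - 1) (-1)]) []

-- ===== PORT B =====
-- linear scan over enumerate(trucks), state (best_i, best_c)
def pvBestTruck (trucks : List Int) (item : Int) : Int :=
  ((PySem.List.enumerate trucks 0).foldl
    (fun (st : Int × Int) p =>
      if p.2 > item ∧ (st.1 = -1 ∨ p.2 < st.2) then (p.1, p.2) else st)
    (-1, 0)).1

def getTrucksForItemsFurtherOptimized_alt (trucks : List Int) (items : List Int) : List Int :=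
  items.map (pvBestTruck trucks)

-- ===== PRECONDITION & SPEC =====
def Spec_getTrucksForItemsFurtherOptimized (trucks : List Int) (items : List Int) (out : List Int) : Prop := out = getTrucksForItemsFurtherOptimized_alt trucks items
instance (trucks : List Int) (items : List Int) (out : List Int) : Decidable (Spec_getTrucksForItemsFurtherOptimized trucks items out) := by unfold Spec_getTrucksForItemsFurtherOptimized; infer_instance

-- ===== CLAIM (what is proved, stated in full; the proofs are below) =====
def Claim_equal_getTrucksForItemsFurtherOptimized : Prop := ∀ (trucks : List Int) (items : List Int), Dom_getTrucksForItemsFurtherOptimized trucks items → Spec_getTrucksForItemsFurtherOptimized trucks items (getTrucksForItemsFurtherOptimized trucks items)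

-- ===== LEMMAS AND PROOFS =====

def pvKey (trucks : List Int) (i : Int) : Int := PySem.List.pyGetD trucks i 0
def pvLex (trucks : List Int) (a b : Int) : Prop :=
  pvKey trucks a < pvKey trucks b ∨ (pvKey trucks a = pvKey trucks b ∧ a < b)
def pvLexLe (trucks : List Int) (a b : Int) : Prop :=
  pvKey trucks a < pvKey trucks b ∨ (pvKey trucks a = pvKey trucks b ∧ a ≤ b)
def pvIsBest (trucks : List Int) (item : Int) (n : Int) (r : Int) : Prop :=
  (r = -1 ∧ ∀ j : Int, 0 ≤ j → j < n → ¬ item < pvKey trucks j) ∨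
  (0 ≤ r ∧ r < n ∧ item < pvKey trucks r ∧
    ∀ j : Int, 0 ≤ j → j < n → item < pvKey trucks j → pvLexLe trucks r j)

lemma pvIsBest_unique (trucks : List Int) (item n r1 r2 : Int)
    (h1 : pvIsBest trucks item n r1) (h2 : pvIsBest trucks item n r2) : r1 = r2 := by
  rcases h1 with ⟨e1, h1⟩ | ⟨b1, l1, q1, m1⟩ <;> rcases h2 with ⟨e2, h2⟩ | ⟨b2, l2, q2, m2⟩
  · omega
  · exact absurd q2 (h1 r2 b2 l2)
  · exact absurd q1 (h2 r1 b1 l1)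
  · have ha := m1 r2 b2 l2 q2
    have hb := m2 r1 b1 l1 q1
    unfold pvLexLe at ha hb
    omega

lemma pvInsertBy_lex (trucks : List Int) (x : Int) : ∀ (acc : List Int),
    acc.Pairwise (pvLex trucks) → (∀ y ∈ acc, y < x) →
    (PySem.List.insertBy (fun a b => decide (pvKey trucks a < pvKey trucks b)) x acc).Pairwise
      (pvLex trucks) := by
  intro acc
  induction acc with
  | nil => intro _ _; simp [PySem.List.insertBy]
  | cons y ys ih =>
    intro hp hlt
    rw [List.pairwise_cons] at hp
    simp only [PySem.List.insertBy]
    split_ifs with hb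
    · simp only [decide_eq_true_eq] at hb
      refine List.Pairwise.cons ?_ (List.Pairwise.cons hp.1 hp.2)
      intro z hz
      rcases hz with _ | hz
      · exact Or.inl hb
      · rename_i hz'
        have := hp.1 z hz'
        unfold pvLex at *
        omega
    · simp only [decide_eq_true_eq] at hb
      refine List.Pairwise.cons ?_ (ih hp.2 (fun y hy => hlt y (List.mem_cons_of_mem _ hy)))
      intro z hz
      rw [PySem.List.mem_insertBy] at hz
      rcases hz with hzx | hz
      · rw [hzx]
        have : y < x := hlt y (by simp)
        unfold pvLex; omega
      · exact hp.1 z hz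

lemma pvFoldl_insertBy_lex (trucks : List Int) :
    ∀ (xs acc : List Int), xs.Pairwise (· < ·) → acc.Pairwise (pvLex trucks) →
    (∀ y ∈ acc, ∀ z ∈ xs, y < z) →
    (xs.foldl (fun acc x =>
        PySem.List.insertBy (fun a b => decide (pvKey trucks a < pvKey trucks b)) x acc) acc).Pairwise
      (pvLex trucks) := by
  intro xs
  induction xs with
  | nil => intro acc _ hp _; simpa using hp
  | cons x r ih =>
    intro acc hx hp hlt
    rw [List.pairwise_cons] at hx
    simp only [List.foldl_cons]
    refine ih _ hx.2 (pvInsertBy_lex trucks x acc hp (fun y hy => hlt y hy x (by simp))) ?_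
    intro y hy z hz
    rw [PySem.List.mem_insertBy] at hy
    rcases hy with hyx | hy
    · rw [hyx]; exact hx.1 z hz
    · exact hlt y hy z (List.mem_cons_of_mem _ hz)

lemma pvSorted_lex (trucks : List Int) : (pvSortedIndices trucks).Pairwise (pvLex trucks) := by
  unfold pvSortedIndices
  rw [PySem.List.sorted_eq_foldl_insertBy]
  exact pvFoldl_insertBy_lex trucks _ [] (PySem.List.pairwise_lt_pyRange_one 0 _)
    (by simp) (by simp)

lemma pvSorted_mem (trucks : List Int) (j : Int) :
    j ∈ pvSortedIndices trucks ↔ 0 ≤ j ∧ j < (trucks.length : Int) := by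
  unfold pvSortedIndices
  rw [(PySem.List.sorted_perm _ _ _).mem_iff, PySem.List.mem_pyRange_one]

def pvFindGT (trucks : List Int) (item : Int) : List Int → Int
  | [] => -1
  | x :: r => if item < pvKey trucks x then x else pvFindGT trucks item r

lemma pvFindGT_isBest' (trucks : List Int) (item : Int) : ∀ (s : List Int),
    s.Pairwise (pvLex trucks) →
    (pvFindGT trucks item s = -1 ∧ ∀ j ∈ s, ¬ item < pvKey trucks j) ∨
    (pvFindGT trucks item s ∈ s ∧ item < pvKey trucks (pvFindGT trucks item s) ∧
      ∀ j ∈ s, item < pvKey trucks j → pvLexLe trucks (pvFindGT trucks item s) j) := by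
  intro s
  induction s with
  | nil => intro _; left; simp [pvFindGT]
  | cons x r ih =>
    intro hp
    rw [List.pairwise_cons] at hp
    by_cases hq : item < pvKey trucks x
    · right
      simp only [pvFindGT, if_pos hq]
      refine ⟨by simp, hq, ?_⟩
      intro j hj _
      rcases List.mem_cons.mp hj with rfl | hj
      · unfold pvLexLe; omega
      · have := hp.1 j hj
        unfold pvLex at this; unfold pvLexLe; omega
    · simp only [pvFindGT, if_neg hq]
      rcases ih hp.2 with ⟨he, hall⟩ | ⟨hm, hqq, hall⟩
      · left
        refine ⟨he, ?_⟩
        intro j hj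
        rcases List.mem_cons.mp hj with rfl | hj
        · exact hq
        · exact hall j hj
      · right
        refine ⟨List.mem_cons_of_mem _ hm, hqq, ?_⟩
        intro j hj hjq
        rcases List.mem_cons.mp hj with rfl | hj
        · exact absurd hjq hq
        · exact hall j hj hjq

lemma pvGetD_cons_shift (x : Int) (r : List Int) (k : Int) (h0 : 0 ≤ k) (h1 : k < (r.length : Int)) :
    PySem.List.pyGetD (x :: r) (k + 1) 0 = PySem.List.pyGetD r k 0 := by
  rw [PySem.List.pyGetD_eq_getElem _ _ (by omega) (by simp; omega),
      PySem.List.pyGetD_eq_getElem _ _ h0 (by omega)]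
  have ht : (k + 1).toNat = k.toNat + 1 := by omega
  simp [ht]

lemma pvFindGT_eq (trucks : List Int) (item : Int) :
    ∀ (s : List Int) (L : Int), 0 ≤ L → L ≤ (s.length : Int) →
    (∀ k : Int, 0 ≤ k → k < L → ¬ item < pvKey trucks (PySem.List.pyGetD s k 0)) →
    (∀ k : Int, L ≤ k → k < (s.length : Int) → item < pvKey trucks (PySem.List.pyGetD s k 0)) →
    pvFindGT trucks item s =
      (if L < (s.length : Int) then PySem.List.pyGetD s L 0 else -1) := by
  intro s
  induction s with
  | nil =>
    intro L h0 h1 _ _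
    simp only [pvFindGT, List.length_nil, Nat.cast_zero]
    rw [if_neg (by omega)]
  | cons x r ih =>
    intro L h0 h1 hfail hok
    by_cases hL : L = 0
    · subst hL
      have hq : item < pvKey trucks x := by
        have := hok 0 (le_refl _) (by simp)
        rwa [PySem.List.pyGetD_zero_cons] at this
      simp only [pvFindGT, if_pos hq]
      rw [if_pos (by simp), PySem.List.pyGetD_zero_cons]
    · have hq : ¬ item < pvKey trucks x := by
        have := hfail 0 (le_refl _) (by omega)
        rwa [PySem.List.pyGetD_zero_cons] at this
      simp only [pvFindGT, if_neg hq]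
      have hlen : ((x :: r).length : Int) = (r.length : Int) + 1 := by simp
      have hrec := ih (L - 1) (by omega) (by omega)
        (fun k hk0 hkL => by
          have := hfail (k + 1) (by omega) (by omega)
          rwa [pvGetD_cons_shift x r k hk0 (by omega)] at this)
        (fun k hkL hkr => by
          have := hok (k + 1) (by omega) (by omega)
          rwa [pvGetD_cons_shift x r k (by omega) hkr] at this)
      rw [hrec]
      by_cases hcond : L - 1 < (r.length : Int)
      · rw [if_pos hcond, if_pos (by omega), ← pvGetD_cons_shift x r (L-1) (by omega) hcond]
        congr 1
        omega
      · rw [if_neg hcond, if_neg (by omega)]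

lemma pvFindGT_exit (trucks : List Int) (item : Int) (s : List Int) (right mi : Int)
    (hm1 : -1 ≤ right) (h2 : right < (s.length : Int))
    (hL : ∀ k : Int, 0 ≤ k → k < right + 1 → ¬ item < pvKey trucks (PySem.List.pyGetD s k 0))
    (hR : ∀ k : Int, right < k → k < (s.length : Int) → item < pvKey trucks (PySem.List.pyGetD s k 0))
    (hmi : mi = (if right + 1 < (s.length : Int) then PySem.List.pyGetD s (right + 1) 0 else -1)) :
    pvFindGT trucks item s = mi := by
  rw [hmi]
  exact pvFindGT_eq trucks item s (right + 1) (by omega) (by omega) hL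
    (fun k hk hk2 => hR k (by omega) hk2)

lemma pvBSearch_eq (trucks : List Int) (item : Int) (s : List Int)
    (hmono : ∀ p q : Int, 0 ≤ p → p ≤ q → q < (s.length : Int) →
      item < pvKey trucks (PySem.List.pyGetD s p 0) →
      item < pvKey trucks (PySem.List.pyGetD s q 0)) :
    ∀ (n : Nat) (left right mi : Int), (right + 1 - left).toNat ≤ n →
    0 ≤ left → left ≤ right + 1 → right < (s.length : Int) →
    (∀ k : Int, 0 ≤ k → k < left → ¬ item < pvKey trucks (PySem.List.pyGetD s k 0)) →
    (∀ k : Int, right < k → k < (s.length : Int) → item < pvKey trucks (PySem.List.pyGetD s k 0)) →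
    mi = (if right + 1 < (s.length : Int) then PySem.List.pyGetD s (right + 1) 0 else -1) →
    pvBSearch trucks s item left right mi = pvFindGT trucks item s := by
  intro n
  induction n with
  | zero =>
    intro left right mi hn h0 h1 h2 hL hR hmi
    rw [pvBSearch, dif_neg (by omega)]
    exact (pvFindGT_exit trucks item s right mi (by omega) h2 (fun k hk hk2 => hL k hk (by omega)) hR hmi).symm
  | succ n ih =>
    intro left right mi hn h0 h1 h2 hL hR hmi
    rw [pvBSearch]
    by_cases hlr : left ≤ right
    · rw [dif_pos hlr]
      have hfd : PySem.Int.floordiv (right - left) 2 = (right - left) / 2 :=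
        PySem.Int.floordiv_eq_ediv_of_pos (by omega)
      simp only [gt_iff_lt]
      set mid := left + PySem.Int.floordiv (right - left) 2 with hmid
      have hbl : left ≤ mid := by rw [hmid, hfd]; omega
      have hbr : mid ≤ right := by rw [hmid, hfd]; omega
      by_cases hc : item < PySem.List.pyGetD trucks (PySem.List.pyGetD s mid 0) 0
      · rw [if_pos hc]
        refine ih left (mid - 1) _ (by omega) h0 (by omega) (by omega) hL ?_ ?_
        · intro k hk1 hk2
          rcases eq_or_lt_of_le (by omega : mid ≤ k) with rfl | hlt
          · exact hc
          · exact hmono mid k (by omega) (by omega) hk2 hc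
        · rw [if_pos (by omega)]
          congr 1
          omega
      · rw [if_neg hc]
        refine ih (mid + 1) right mi (by omega) (by omega) (by omega) h2 ?_ hR hmi
        intro k hk1 hk2
        by_cases hkl : k < left
        · exact hL k hk1 hkl
        · intro hq
          exact hc (hmono k mid hk1 (by omega) (by omega) hq)
    · rw [dif_neg hlr]
      exact (pvFindGT_exit trucks item s right mi (by omega) h2 (fun k hk hk2 => hL k hk (by omega)) hR hmi).symm

def pvInv (trucks : List Int) (item : Int) (b : Int) (st : Int × Int) : Prop :=
  (st.1 = -1 ∧ st.2 = 0 ∧ ∀ j : Int, 0 ≤ j → j < b → ¬ item < pvKey trucks j) ∨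
  (0 ≤ st.1 ∧ st.1 < b ∧ st.2 = pvKey trucks st.1 ∧ item < st.2 ∧
    ∀ j : Int, 0 ≤ j → j < b → item < pvKey trucks j → pvLexLe trucks st.1 j)

lemma pvScan_inv (trucks : List Int) (item : Int) :
    ∀ (l : List Int) (a : Int) (st : Int × Int), 0 ≤ a → l = trucks.drop a.toNat →
    pvInv trucks item a st →
    pvInv trucks item (a + (l.length : Int))
      ((PySem.List.enumerate l a).foldl
        (fun (st : Int × Int) p =>
          if p.2 > item ∧ (st.1 = -1 ∨ p.2 < st.2) then (p.1, p.2) else st) st) := by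
  intro l
  induction l with
  | nil => intro a st h0 _ hinv; simpa [PySem.List.enumerate] using hinv
  | cons x r ih =>
    intro a st h0 hd hinv
    have hlen : a.toNat < trucks.length := by
      have := congrArg List.length hd
      simp [List.length_drop] at this
      omega
    have hx : pvKey trucks a = x := by
      rw [pvKey, PySem.List.pyGetD_eq_getElem _ _ h0 (by omega)]
      have h00 : trucks[a.toNat] = (trucks.drop a.toNat)[0]'(by rw [← hd]; simp) := by
        rw [List.getElem_drop]
        simp
      rw [h00]
      simp [← hd]
    have hr : r = trucks.drop (a + 1).toNat := by
      have hdd : trucks.drop (a + 1).toNat = List.drop 1 (trucks.drop a.toNat) := by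
        rw [List.drop_drop]
        congr 1
        omega
      rw [hdd, ← hd]
      simp
    rw [PySem.List.enumerate_cons, List.foldl_cons]
    have hstep : pvInv trucks item (a + 1)
        (if x > item ∧ (st.1 = -1 ∨ x < st.2) then ((a : Int), x) else st) := by
      by_cases hq : x > item ∧ (st.1 = -1 ∨ x < st.2)
      · rw [if_pos hq]
        refine Or.inr ⟨h0, by omega, hx.symm, hq.1, ?_⟩
        intro j hj0 hj1 hjq
        show pvLexLe trucks a j
        by_cases hja : j = a
        · subst hja; right; exact ⟨rfl, le_refl _⟩
        · have hjlt : j < a := by omega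
          rcases hinv with ⟨he, _, hnone⟩ | ⟨hb0, hb1, hbk, hbq, hmin⟩
          · exact absurd hjq (hnone j hj0 hjlt)
          · rcases hq.2 with h | h
            · omega
            · have hm := hmin j hj0 hjlt hjq
              unfold pvLexLe at hm ⊢
              rw [hx]
              rw [← hbk] at hm
              omega
      · rw [if_neg hq]
        rcases hinv with ⟨he, hz, hnone⟩ | ⟨hb0, hb1, hbk, hbq, hmin⟩
        · left
          refine ⟨he, hz, ?_⟩
          intro j hj0 hj1
          by_cases hja : j = a
          · subst hja
            rw [hx]
            intro hc
            exact hq ⟨hc, Or.inl he⟩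
          · exact hnone j hj0 (by omega)
        · right
          refine ⟨hb0, by omega, hbk, hbq, ?_⟩
          intro j hj0 hj1 hjq
          by_cases hja : j = a
          · subst hja
            rw [hx] at hjq
            have hxs : ¬ x < st.2 := fun hc => hq ⟨by omega, Or.inr hc⟩
            unfold pvLexLe
            rw [← hbk, hx]
            omega
          · exact hmin j hj0 (by omega) hjq
    have hres := ih (a + 1) _ (by omega) hr hstep
    have hcast : a + ((x :: r).length : Int) = (a + 1) + (r.length : Int) := by
      push_cast [List.length_cons]
      omega
    rw [hcast]
    exact hres

lemma pvBestTruck_isBest (trucks : List Int) (item : Int) :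
    pvIsBest trucks item (trucks.length : Int) (pvBestTruck trucks item) := by
  have h := pvScan_inv trucks item trucks 0 (-1, 0) (le_refl _) (by simp) (by
    left; exact ⟨rfl, rfl, fun j hj0 hj1 => absurd hj1 (by omega)⟩)
  rw [zero_add] at h
  unfold pvBestTruck pvIsBest
  rcases h with ⟨he, _, hnone⟩ | ⟨hb0, hb1, hbk, hbq, hmin⟩
  · left; exact ⟨he, hnone⟩
  · right
    refine ⟨hb0, hb1, by rw [← hbk]; exact hbq, hmin⟩

lemma pvFindGT_sorted_isBest (trucks : List Int) (item : Int) :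
    pvIsBest trucks item (trucks.length : Int)
      (pvFindGT trucks item (pvSortedIndices trucks)) := by
  rcases pvFindGT_isBest' trucks item (pvSortedIndices trucks) (pvSorted_lex trucks) with
    ⟨he, hnone⟩ | ⟨hm, hq, hmin⟩
  · left
    exact ⟨he, fun j hj0 hj1 => hnone j ((pvSorted_mem trucks j).mpr ⟨hj0, hj1⟩)⟩
  · right
    have hb := (pvSorted_mem trucks _).mp hm
    exact ⟨hb.1, hb.2, hq, fun j hj0 hj1 hjq => hmin j ((pvSorted_mem trucks j).mpr ⟨hj0, hj1⟩) hjq⟩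

lemma pvSorted_mono (trucks : List Int) (item : Int) :
    ∀ p q : Int, 0 ≤ p → p ≤ q → q < ((pvSortedIndices trucks).length : Int) →
      item < pvKey trucks (PySem.List.pyGetD (pvSortedIndices trucks) p 0) →
      item < pvKey trucks (PySem.List.pyGetD (pvSortedIndices trucks) q 0) := by
  intro p q hp hpq hq hlt
  rw [PySem.List.pyGetD_eq_getElem _ _ (by omega) (by omega)] at hlt
  rw [PySem.List.pyGetD_eq_getElem _ _ (by omega) (by omega)]
  have hmono := PySem.List.key_sorted_getElem_mono (PySem.List.pyRange 0 (trucks.length : Int) 1)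
    (fun i => PySem.List.pyGetD trucks i 0) (p := p.toNat) (q := q.toNat) (by omega)
    (by omega : q.toNat < (pvSortedIndices trucks).length)
  exact lt_of_lt_of_le hlt hmono

lemma pvItem_eq (trucks : List Int) (item : Int) :
    pvBSearch trucks (pvSortedIndices trucks) item 0
      (((pvSortedIndices trucks).length : Int) - 1) (-1) = pvBestTruck trucks item := by
  have hsearch := pvBSearch_eq trucks item (pvSortedIndices trucks) (pvSorted_mono trucks item)
    (pvSortedIndices trucks).length 0 (((pvSortedIndices trucks).length : Int) - 1) (-1)
    (by omega) (le_refl _) (by omega) (by omega)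
    (by intro k hk1 hk2; omega)
    (by intro k hk1 hk2; exact absurd hk1 (by omega))
    (by rw [if_neg (by omega)])
  rw [hsearch]
  exact pvIsBest_unique trucks item (trucks.length : Int) _ _
    (pvFindGT_sorted_isBest trucks item) (pvBestTruck_isBest trucks item)

-- ===== VERDICT (by name: the statement is the Claim_ definition above) =====
theorem getTrucksForItemsFurtherOptimized_spec : Claim_equal_getTrucksForItemsFurtherOptimized := by
  intro trucks items _
  show _ = _
  unfold getTrucksForItemsFurtherOptimized getTrucksForItemsFurtherOptimized_alt
  rw [PySem.List.foldl_append_singleton_eq_map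
    (fun item => pvBSearch trucks (pvSortedIndices trucks) item 0
      (((pvSortedIndices trucks).length : Int) - 1) (-1))]
  simp only [List.nil_append]
  exact List.map_congr_left (fun item _ => pvItem_eq trucks item)
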